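-- pv_equiv track=rewrite | github.com/fitosky1/Python-Practice-Testing | day8_functions_multi_output.py | max_sum_mult_in_nested
-- ===== SOURCE A (Python) =====
-- def max_sum_mult_in_nested(nested_list1, nested_list2):
--     # max of both matrices
--     max_i1 = 0
--     max_j1 = 0
--     for i in range(len(nested_list1)):
--         for j in range(len(nested_list1[i])):
--             if nested_list1[i][j] > nested_list1[max_i1][max_j1]:
--                 max_i1 = i
--                 max_j1 = j
--     max_i2 = 0
--     max_j2 = 0
--     for i in range(len(nested_list2)):
--         for j in range(len(nested_list2[i])):
--             if nested_list2[i][j] > nested_list2[max_i2][max_j2]: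
--                 max_i2 = i
--                 max_j2 = j
--     # mutiplication
--     ln1 = len(nested_list1)
--     ln2 = len(nested_list1[0])
--     tmp_mlist = [[0 for columns in range(ln2)] for rows in range(ln1)]
--     for i in range(ln1):
--         for j in range(ln2):
--             tmp_mlist[i][j] = (
--                 nested_list1[i][j] * nested_list2[i][j]
--             )  # replace in place
--     # Global sum
--     sum1 = 0
--     for i in range(len(nested_list1)):
--         for j in range(len(nested_list1[i])):
--             sum1 += nested_list1[i][j]
--     sum2 = 0
--     for i in range(len(nested_list2)):
--         for j in range(len(nested_list2[i])):
--             sum2 += nested_list2[i][j]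
--     return (
--         (nested_list1[max_i1][max_j1], max_i1, max_j1),
--         (nested_list2[max_i2][max_j2], max_i2, max_j2),
--         sum1,
--         sum2,
--         tmp_mlist,
--     )  # multiple outputs are a tuple
-- ===== SOURCE B (Python) =====
-- def _scan(m):
--     # one fused pass: running argmax (strict >, first occurrence wins) and total sum
--     best_v, bi, bj = m[0][0], 0, 0
--     total = 0
--     for i, row in enumerate(m):
--         for j, v in enumerate(row):
--             total += v
--             if v > best_v:
--                 best_v, bi, bj = v, i, j
--     return (best_v, bi, bj), total
--
--
-- def max_sum_mult_in_nested(nested_list1, nested_list2):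
--     best1, sum1 = _scan(nested_list1)
--     best2, sum2 = _scan(nested_list2)
--     rows = len(nested_list1)
--     cols = len(nested_list1[0])
--     product = [
--         [nested_list1[i][j] * nested_list2[i][j] for j in range(cols)]
--         for i in range(rows)
--     ]
--     return (best1, best2, sum1, sum2, product)
-- ===== Notes on version B (the rewrite author's own statement) =====
-- stated objective: alternative
-- what changed: A's four separate index-range traversals (argmax1, argmax2, sum1, sum2) are fused into one enumerate pass per matrix tracking running max and sum together, and the product matrix is built directly by a nested comprehension instead of preallocating a zero matrix and mutating it in place.
import Mathlib
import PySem

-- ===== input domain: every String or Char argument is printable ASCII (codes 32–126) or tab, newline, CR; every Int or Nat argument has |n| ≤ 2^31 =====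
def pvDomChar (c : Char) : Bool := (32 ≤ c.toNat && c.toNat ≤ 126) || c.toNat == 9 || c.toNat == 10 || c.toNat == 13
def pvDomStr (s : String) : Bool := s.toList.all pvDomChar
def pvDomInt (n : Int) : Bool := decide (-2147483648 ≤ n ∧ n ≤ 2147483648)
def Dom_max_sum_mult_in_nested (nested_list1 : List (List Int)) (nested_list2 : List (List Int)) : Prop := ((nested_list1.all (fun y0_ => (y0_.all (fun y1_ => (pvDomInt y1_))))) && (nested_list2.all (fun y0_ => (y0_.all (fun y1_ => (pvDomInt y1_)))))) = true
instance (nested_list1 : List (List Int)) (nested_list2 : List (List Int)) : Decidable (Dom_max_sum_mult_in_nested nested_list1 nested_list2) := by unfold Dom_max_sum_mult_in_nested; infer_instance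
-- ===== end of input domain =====

-- B fuses A's four separate index-range traversals into one enumerate pass per matrix
-- (running argmax with strict > plus running sum together) and builds the product matrix
-- directly by a nested comprehension instead of preallocating zeros and mutating in place
-- (alternative decomposition, same asymptotic cost).

-- ===== PORT A =====
-- A's argmax-by-indices loop (the identical code is run on each matrix):
-- for i in range(len(m)): for j in range(len(m[i])): if m[i][j] > m[max_i][max_j]: ...
def pvA_max (m : List (List Int)) : Int × Int :=
  (PySem.List.pyRange 0 (m.length : Int) 1).foldl (fun mx i =>
    (PySem.List.pyRange 0 ((PySem.List.pyGetD m i []).length : Int) 1).foldl (fun mx j =>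
      if PySem.List.pyGetD (PySem.List.pyGetD m i []) j 0 >
         PySem.List.pyGetD (PySem.List.pyGetD m mx.1 []) mx.2 0 then (i, j) else mx) mx) (0, 0)

-- A's global-sum loop: for i in range(len(m)): for j in range(len(m[i])): sum += m[i][j]
def pvA_sum (m : List (List Int)) : Int :=
  (PySem.List.pyRange 0 (m.length : Int) 1).foldl (fun s i =>
    (PySem.List.pyRange 0 ((PySem.List.pyGetD m i []).length : Int) 1).foldl (fun s j =>
      s + PySem.List.pyGetD (PySem.List.pyGetD m i []) j 0) s) 0

-- indexing/assignment are ported with pyGetD/pySetD; inside Pre_ every index A uses is in range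
def max_sum_mult_in_nested (nested_list1 : List (List Int)) (nested_list2 : List (List Int)) : (Int × Int × Int) × (Int × Int × Int) × Int × Int × List (List Int) :=
  let mx1 := pvA_max nested_list1
  let mx2 := pvA_max nested_list2
  let ln1 : Int := nested_list1.length
  let ln2 : Int := (PySem.List.pyGetD nested_list1 0 []).length
  let tmp0 := (PySem.List.pyRange 0 ln1 1).map (fun _ => (PySem.List.pyRange 0 ln2 1).map (fun _ => (0 : Int)))
  let tmp := (PySem.List.pyRange 0 ln1 1).foldl (fun t i =>
      (PySem.List.pyRange 0 ln2 1).foldl (fun t j =>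
        PySem.List.pySetD t i (PySem.List.pySetD (PySem.List.pyGetD t i []) j
          (PySem.List.pyGetD (PySem.List.pyGetD nested_list1 i []) j 0 *
           PySem.List.pyGetD (PySem.List.pyGetD nested_list2 i []) j 0))) t) tmp0
  ((PySem.List.pyGetD (PySem.List.pyGetD nested_list1 mx1.1 []) mx1.2 0, mx1.1, mx1.2),
   (PySem.List.pyGetD (PySem.List.pyGetD nested_list2 mx2.1 []) mx2.2 0, mx2.1, mx2.2),
   pvA_sum nested_list1, pvA_sum nested_list2, tmp)

-- ===== PORT B =====
-- B's _scan: ONE fused enumerate pass tracking the running argmax (strict >) and the running sum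
def pvB_scan (m : List (List Int)) : (Int × Int × Int) × Int :=
  (PySem.List.enumerate m 0).foldl (fun st p =>
    (PySem.List.enumerate p.2 0).foldl (fun st q =>
      ((if q.2 > st.1.1 then (q.2, p.1, q.1) else st.1), st.2 + q.2)) st)
    ((PySem.List.pyGetD (PySem.List.pyGetD m 0 []) 0 0, 0, 0), 0)

def max_sum_mult_in_nested_alt (nested_list1 : List (List Int)) (nested_list2 : List (List Int)) : (Int × Int × Int) × (Int × Int × Int) × Int × Int × List (List Int) :=
  let s1 := pvB_scan nested_list1
  let s2 := pvB_scan nested_list2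
  let rows : Int := nested_list1.length
  let cols : Int := (PySem.List.pyGetD nested_list1 0 []).length
  let product := (PySem.List.pyRange 0 rows 1).map (fun i =>
      (PySem.List.pyRange 0 cols 1).map (fun j =>
        PySem.List.pyGetD (PySem.List.pyGetD nested_list1 i []) j 0 *
        PySem.List.pyGetD (PySem.List.pyGetD nested_list2 i []) j 0))
  (s1.1, s2.1, s1.2, s2.2, product)

-- ===== PRECONDITION & SPEC =====
-- Pre_ excludes exactly the inputs on which Python A raises an IndexError: an empty
-- nested_list1; an empty first row of nested_list1 (nested_list1[0][0] is read by the
-- argmax loop and at the return, and len(nested_list1[0]) sets the product width); rows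
-- of nested_list1 shorter than its first row; or a nested_list2 whose shape does not
-- cover the len(nested_list1) × len(nested_list1[0]) product region.
def Pre_max_sum_mult_in_nested (nested_list1 : List (List Int)) (nested_list2 : List (List Int)) : Prop :=
  nested_list1 ≠ [] ∧
  1 ≤ (nested_list1.headD []).length ∧
  (∀ r ∈ nested_list1, (nested_list1.headD []).length ≤ r.length) ∧
  nested_list1.length ≤ nested_list2.length ∧
  (∀ r ∈ nested_list2.take nested_list1.length, (nested_list1.headD []).length ≤ r.length)
instance (nested_list1 : List (List Int)) (nested_list2 : List (List Int)) : Decidable (Pre_max_sum_mult_in_nested nested_list1 nested_list2) := by unfold Pre_max_sum_mult_in_nested; infer_instance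

def pvWitness_max_sum_mult_in_nested : List (List Int) × List (List Int) := ([[1, 2], [3, 4]], [[5, 6], [7, 8]])

def Spec_max_sum_mult_in_nested (nested_list1 : List (List Int)) (nested_list2 : List (List Int)) (out : (Int × Int × Int) × (Int × Int × Int) × Int × Int × List (List Int)) : Prop := out = max_sum_mult_in_nested_alt nested_list1 nested_list2
instance (nested_list1 : List (List Int)) (nested_list2 : List (List Int)) (out : (Int × Int × Int) × (Int × Int × Int) × Int × Int × List (List Int)) : Decidable (Spec_max_sum_mult_in_nested nested_list1 nested_list2 out) := by unfold Spec_max_sum_mult_in_nested; infer_instance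

-- ===== CLAIM (what is proved, stated in full; the proofs are below) =====
def Claim_equal_max_sum_mult_in_nested : Prop := ∀ (nested_list1 : List (List Int)) (nested_list2 : List (List Int)), Dom_max_sum_mult_in_nested nested_list1 nested_list2 → Pre_max_sum_mult_in_nested nested_list1 nested_list2 → Spec_max_sum_mult_in_nested nested_list1 nested_list2 (max_sum_mult_in_nested nested_list1 nested_list2)

-- ===== LEMMAS AND PROOFS =====

-- two folds over the same list whose states are kept in relation R step by step
theorem pv_foldl_rel {α β γ : Type} (R : β → γ → Prop) (f : β → α → β) (g : γ → α → γ)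
    (l : List α) (b : β) (c : γ) (hb : R b c)
    (h : ∀ s t a, R s t → R (f s a) (g t a)) : R (l.foldl f b) (l.foldl g c) := by
  induction l generalizing b c with
  | nil => exact hb
  | cons x xs ih => exact ih _ _ (h _ _ _ hb)

-- a fold whose step updates the two components of a pair independently splits in two folds
theorem pv_foldl_pair {α β γ : Type} (f : β → α → β) (g : γ → α → γ)
    (l : List α) (b : β) (c : γ) :
    l.foldl (fun s a => (f s.1 a, g s.2 a)) (b, c) = (l.foldl f b, l.foldl g c) := by
  induction l generalizing b c with
  | nil => rfl
  | cons x xs ih => exact ih (f b x) (g c x)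

-- B's fused scan computes exactly A's argmax (the value looked up at A's final index pair) and A's sum
theorem pv_scan_eq (m : List (List Int)) :
    pvB_scan m =
      ((PySem.List.pyGetD (PySem.List.pyGetD m (pvA_max m).1 []) (pvA_max m).2 0,
        (pvA_max m).1, (pvA_max m).2), pvA_sum m) := by
  unfold pvB_scan
  have hsplit :
      (fun (st : (Int × Int × Int) × Int) (p : Int × List Int) =>
        (PySem.List.enumerate p.2 0).foldl (fun st q =>
          ((if q.2 > st.1.1 then (q.2, p.1, q.1) else st.1), st.2 + q.2)) st)
      = fun st p =>
        ((PySem.List.enumerate p.2 0).foldl (fun b q => if q.2 > b.1 then (q.2, p.1, q.1) else b) st.1,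
         (PySem.List.enumerate p.2 0).foldl (fun t q => t + q.2) st.2) := by
    funext st p
    cases st with
    | mk b c =>
      exact pv_foldl_pair (f := fun (b : Int × Int × Int) (q : Int × Int) => if q.2 > b.1 then (q.2, p.1, q.1) else b)
        (g := fun (t : Int) (q : Int × Int) => t + q.2) _ b c
  rw [hsplit,
    pv_foldl_pair
      (f := fun b (p : Int × List Int) =>
        (PySem.List.enumerate p.2 0).foldl (fun b q => if q.2 > b.1 then (q.2, p.1, q.1) else b) b)
      (g := fun t (p : Int × List Int) =>
        (PySem.List.enumerate p.2 0).foldl (fun t q => t + q.2) t)]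
  simp only [PySem.List.enumerate_eq_map_pyRange (d := ([] : List Int)),
             PySem.List.enumerate_eq_map_pyRange (d := (0 : Int)),
             List.foldl_map, PySem.List.len_eq]
  rw [Prod.mk.injEq]
  constructor
  · unfold pvA_max
    exact pv_foldl_rel
      (R := fun (b : Int × Int × Int) (mx : Int × Int) =>
        b = (PySem.List.pyGetD (PySem.List.pyGetD m mx.1 []) mx.2 0, mx.1, mx.2))
      _ _ _ _ _ rfl
      (by
        intro s t p hR
        refine pv_foldl_rel
          (R := fun (b : Int × Int × Int) (mx : Int × Int) =>
            b = (PySem.List.pyGetD (PySem.List.pyGetD m mx.1 []) mx.2 0, mx.1, mx.2))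
          _ _ _ _ _ hR ?_
        intro s' t' j hR'
        subst hR'
        by_cases h : PySem.List.pyGetD (PySem.List.pyGetD m p []) j 0 >
            PySem.List.pyGetD (PySem.List.pyGetD m t'.1 []) t'.2 0
        · simp [h]
        · simp [h])
  · rfl

theorem pv_set_getD_self (t : List (List Int)) (k : Nat) (hk : k < t.length) :
    t.set k (t.getD k []) = t := by
  apply List.ext_getElem
  · simp
  · intro i h1 h2
    by_cases h : i = k
    · subst h; simp [List.getD, List.getElem?_eq_getElem hk]
    · simp only [List.getElem_set]; rw [if_neg (by omega)]

theorem pv_getD_set_self {α : Type} (t : List α) (k : Nat) (v : α) (d : α) (hk : k < t.length) :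
    (t.set k v).getD k d = v := by
  rw [List.getD_eq_getElem?_getD, List.getElem?_set_self (by simpa using hk)]
  rfl

-- A's inner product loop touches only row k: it equals setting row k to the row-level fold
theorem pv_fold_set_row (g : Int → Int) (n : Nat) (t : List (List Int)) (k : Nat)
    (hk : k < t.length) :
    (PySem.List.pyRange 0 (n : Int) 1).foldl (fun t j =>
        PySem.List.pySetD t (k : Int) (PySem.List.pySetD (PySem.List.pyGetD t (k : Int) []) j (g j))) t
    = t.set k ((PySem.List.pyRange 0 (n : Int) 1).foldl (fun r j => PySem.List.pySetD r j (g j)) (t.getD k [])) := by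
  induction n with
  | zero =>
    simp [PySem.List.pyRange_one_eq_nil (le_refl 0)]
    exact (pv_set_getD_self t k hk).symm
  | succ n ih =>
    have hcast : ((n + 1 : Nat) : Int) = (n : Int) + 1 := by push_cast; ring
    rw [hcast, PySem.List.pyRange_one_succ_right (by positivity), List.foldl_append,
      List.foldl_append, ih]
    simp only [List.foldl_cons, List.foldl_nil, PySem.List.pyGetD_natCast,
      PySem.List.pySetD_natCast]
    rw [pv_getD_set_self _ _ _ _ (by simpa using hk), List.set_set]

-- overwriting the first n cells of a row in order yields the comprehension row
theorem pv_fold_overwrite (g : Int → Int) (n : Nat) (r : List Int) (hn : n ≤ r.length) :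
    (PySem.List.pyRange 0 (n : Int) 1).foldl (fun r j => PySem.List.pySetD r j (g j)) r
    = (PySem.List.pyRange 0 (n : Int) 1).map g ++ r.drop n := by
  induction n with
  | zero => simp [PySem.List.pyRange_one_eq_nil (le_refl 0)]
  | succ n ih =>
    have hcast : ((n + 1 : Nat) : Int) = (n : Int) + 1 := by push_cast; ring
    have hn' : n < r.length := hn
    rw [hcast, PySem.List.pyRange_one_succ_right (by positivity), List.foldl_append,
      ih (le_of_lt hn'), List.map_append]
    simp only [List.foldl_cons, List.foldl_nil, List.map_cons, List.map_nil]
    have hlen : ((PySem.List.pyRange 0 (n : Int) 1).map g).length = n := by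
      simp [PySem.List.length_pyRange_one]
    rw [show ((n : Int)) = ((n : Nat) : Int) from rfl, PySem.List.pySetD_natCast]
    rw [List.set_append_right _ _ (by omega), hlen, Nat.sub_self,
      List.drop_eq_getElem_cons hn', List.set_cons_zero]
    simp [List.append_assoc]

-- A's preallocate-then-mutate product loop equals B's direct nested comprehension
theorem pv_outer (f : Int → Int → Int) (N2 : Nat) (t0 : List (List Int))
    (h0 : ∀ r ∈ t0, r.length = N2) :
    ∀ (k : Nat), k ≤ t0.length →
    (PySem.List.pyRange 0 (k : Int) 1).foldl (fun t i =>
        (PySem.List.pyRange 0 (N2 : Int) 1).foldl (fun t j =>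
          PySem.List.pySetD t i (PySem.List.pySetD (PySem.List.pyGetD t i []) j (f i j))) t) t0
    = (PySem.List.pyRange 0 (k : Int) 1).map (fun i => (PySem.List.pyRange 0 (N2 : Int) 1).map (f i))
      ++ t0.drop k := by
  intro k
  induction k with
  | zero => simp [PySem.List.pyRange_one_eq_nil (le_refl 0)]
  | succ k ih =>
    intro hk
    have hk' : k < t0.length := hk
    have hcast : ((k + 1 : Nat) : Int) = (k : Int) + 1 := by push_cast; ring
    rw [hcast, PySem.List.pyRange_one_succ_right (by positivity), List.foldl_append,
      ih (le_of_lt hk'), List.map_append]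
    simp only [List.foldl_cons, List.foldl_nil, List.map_cons, List.map_nil]
    set pre := (PySem.List.pyRange 0 (k : Int) 1).map (fun i => (PySem.List.pyRange 0 (N2 : Int) 1).map (f i)) with hpre
    have hlenpre : pre.length = k := by simp [hpre, PySem.List.length_pyRange_one]
    have hlen : (pre ++ t0.drop k).length = t0.length := by simp [hlenpre]; omega
    have hrow : (pre ++ t0.drop k).getD k [] = t0[k] := by
      rw [List.getD_eq_getElem?_getD, List.getElem?_append_right (by omega), hlenpre, Nat.sub_self]
      rw [List.drop_eq_getElem_cons hk']
      rfl
    have hrowlen : t0[k].length = N2 := h0 _ (List.getElem_mem hk')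
    rw [show ((k : Int)) = ((k : Nat) : Int) from rfl,
      pv_fold_set_row (fun j => f (k : Int) j) N2 _ k (by rw [hlen]; omega), hrow,
      pv_fold_overwrite _ _ _ (le_of_eq hrowlen.symm),
      show List.drop N2 t0[k] = [] from List.drop_eq_nil_of_le (le_of_eq hrowlen),
      List.append_nil]
    rw [List.set_append_right _ _ (by omega), hlenpre, Nat.sub_self,
      List.drop_eq_getElem_cons hk', List.set_cons_zero]
    simp [List.append_assoc]

-- ===== VERDICT (by name: the statement is the Claim_ definition above) =====
theorem max_sum_mult_in_nested_spec : Claim_equal_max_sum_mult_in_nested := by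
  intro l1 l2 _hdom _hpre
  unfold Spec_max_sum_mult_in_nested
  simp only [max_sum_mult_in_nested, max_sum_mult_in_nested_alt]
  rw [pv_scan_eq, pv_scan_eq]
  have hprod := pv_outer
    (fun i j => PySem.List.pyGetD (PySem.List.pyGetD l1 i []) j 0 *
                PySem.List.pyGetD (PySem.List.pyGetD l2 i []) j 0)
    ((PySem.List.pyGetD l1 0 []).length)
    ((PySem.List.pyRange 0 (l1.length : Int) 1).map (fun _ =>
      (PySem.List.pyRange 0 ((PySem.List.pyGetD l1 0 []).length : Int) 1).map (fun _ => (0 : Int))))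
    (by
      intro r hr
      simp only [List.mem_map] at hr
      obtain ⟨_, _, rfl⟩ := hr
      simp [PySem.List.length_pyRange_one])
    l1.length (by simp [PySem.List.length_pyRange_one])
  rw [hprod, List.drop_eq_nil_of_le (by simp [PySem.List.length_pyRange_one]), List.append_nil]
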